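-- pv_equiv track=rewrite | github.com/jaa88/algorithmicPythonProject | a_001/TransferChineseUpperMoney.py | getUpperChineseNumUnderTenThousand
-- ===== SOURCE A (Python) =====
-- upperChineseNum=("壹","贰","叁","肆","伍","陆","柒","捌","玖")
--
-- underThousandNumType=("仟","佰","拾","")
--
-- def getUpperChineseNumUnderTenThousand(num):
--     targetNum = num.lstrip("0")
--     targetNumLength = len(targetNum)
--     returnStrArr = []
--     needAppendZeroflag = True
--     for i in range(targetNumLength):
--         if (targetNum[i] != '0'):
--             needAppendZeroflag = True
--             if (int(targetNum[i]) == 1 and (i + 4 - targetNumLength) == 2):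
--                 returnStrArr.append(underThousandNumType[i + 4 - targetNumLength])
--             else:
--                 returnStrArr.append(
--                     (upperChineseNum[int(targetNum[i]) - 1]) + (underThousandNumType[i + 4 - targetNumLength]))
--         else:
--             if needAppendZeroflag and i != targetNumLength - 1 and followNumHasNoZero(
--                     targetNum[i + 1:int(targetNumLength)]):
--                 needAppendZeroflag = False
--                 returnStrArr.append("零")
--             else:
--                 needAppendZeroflag = True
--     return "".join(returnStrArr)
--
-- def followNumHasNoZero(numStr):
--     for i in numStr:
--         if (i != '0'):
--             return True
--     return False
-- ===== SOURCE B (Python) =====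
-- chineseDigits = ("壹", "贰", "叁", "肆", "伍", "陆", "柒", "捌", "玖")
--
-- chineseUnits = ("", "拾", "佰", "仟")
--
-- def getUpperChineseNumUnderTenThousand(num):
--     s = num.lstrip("0")
--     parts = []
--     pendingZero = False
--     for pos, ch in enumerate(s):
--         d = ord(ch) - ord('0')
--         if d == 0:
--             pendingZero = True
--         else:
--             if pendingZero:
--                 parts.append("零")
--                 pendingZero = False
--             unit = chineseUnits[len(s) - 1 - pos]
--             if d == 1 and unit == "拾":
--                 parts.append("拾")
--             else:
--                 parts.append(chineseDigits[d - 1] + unit)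
--     return "".join(parts)
-- ===== Notes on version B (the rewrite author's own statement) =====
-- stated objective: simpler
-- what changed: A decides each '零' eagerly with a needAppendZeroflag plus a fresh scan of the remaining suffix at every zero digit; B instead keeps a lazy pending-zero flag that is flushed exactly when the next nonzero digit is emitted (so trailing zeros never need a suffix scan), reading units from a reversed unit table indexed by distance from the end.
-- outside the precondition, e.g. on getUpperChineseNumUnderTenThousand('12345'): A returns '壹贰仟叁佰肆拾伍', B raises IndexError
import Mathlib
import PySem

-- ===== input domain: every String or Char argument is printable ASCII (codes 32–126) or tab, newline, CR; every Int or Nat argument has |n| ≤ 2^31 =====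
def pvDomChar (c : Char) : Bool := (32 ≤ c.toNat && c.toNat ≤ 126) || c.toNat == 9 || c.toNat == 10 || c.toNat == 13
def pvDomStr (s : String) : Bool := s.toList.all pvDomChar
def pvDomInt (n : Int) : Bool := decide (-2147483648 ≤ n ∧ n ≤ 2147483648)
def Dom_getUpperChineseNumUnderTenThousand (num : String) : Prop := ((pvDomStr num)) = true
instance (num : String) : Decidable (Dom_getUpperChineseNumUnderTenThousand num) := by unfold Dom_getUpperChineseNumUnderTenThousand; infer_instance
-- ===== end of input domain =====

-- B replaces A's eager '零' emission (flag plus a fresh suffix scan at every zero) by a lazy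
-- pending-zero flag flushed at the next nonzero digit, with units read off a reversed table: simpler, no suffix scans.

-- ===== PORT A =====
def pvUpperChineseNum : List String := ["壹", "贰", "叁", "肆", "伍", "陆", "柒", "捌", "玖"]

def pvUnderThousandNumType : List String := ["仟", "佰", "拾", ""]

def followNumHasNoZero : List Char → Bool
  | [] => false
  | c :: rest => if c ≠ '0' then true else followNumHasNoZero rest

-- body of A after `targetNum = num.lstrip("0")`, on the char list
def pvMainA (t : List Char) : String :=
  let L := t.length
  let res := (List.range L).foldl (fun (st : List String × Bool) i =>
    let c := t.getD i ' '   -- targetNum[i]; i < L so always in range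
    if c ≠ '0' then
      -- int(targetNum[i]) = ord - 48; exact on the digit chars Pre_ admits
      let d : Int := (c.toNat : Int) - 48
      if d == 1 && ((i : Int) + 4 - (L : Int) == 2) then
        (st.1 ++ [(PySem.List.pyGet? pvUnderThousandNumType ((i : Int) + 4 - (L : Int))).getD ""], true)
      else
        (st.1 ++ [((PySem.List.pyGet? pvUpperChineseNum (d - 1)).getD "") ++
                  (PySem.List.pyGet? pvUnderThousandNumType ((i : Int) + 4 - (L : Int))).getD ""], true)
    else
      if st.2 && (i != L - 1) && followNumHasNoZero (t.drop (i + 1)) then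
        (st.1 ++ ["零"], false)
      else
        (st.1, true)) ([], true)
  PySem.Str.join "" res.1

def getUpperChineseNumUnderTenThousand (num : String) : String :=
  -- num.lstrip("0"): drop leading '0' chars (exact)
  pvMainA (num.toList.dropWhile (· == '0'))

-- ===== PORT B =====
-- Source B's chineseDigits is the same nine-string table as A's upperChineseNum; one Lean constant serves both ports
def pvChineseUnits : List String := ["", "拾", "佰", "仟"]

-- body of B after `s = num.lstrip("0")`, on the char list
def pvMainB (t : List Char) : String :=
  let res := (PySem.List.enumerate t).foldl (fun (st : List String × Bool) pc =>
    let pos : Int := pc.1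
    let ch := pc.2
    let d : Int := (ch.toNat : Int) - 48   -- ord(ch) - ord('0')
    if d == 0 then
      (st.1, true)
    else
      let parts := if st.2 then st.1 ++ ["零"] else st.1
      let unit := (PySem.List.pyGet? pvChineseUnits ((t.length : Int) - 1 - pos)).getD ""  -- pos < len s, index in range
      if d == 1 && unit == "拾" then
        (parts ++ ["拾"], false)
      else
        (parts ++ [((PySem.List.pyGet? pvUpperChineseNum (d - 1)).getD "") ++ unit], false)) ([], false)
  PySem.Str.join "" res.1

def getUpperChineseNumUnderTenThousand_alt (num : String) : String :=
  pvMainB (num.toList.dropWhile (· == '0'))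

-- ===== PRECONDITION & SPEC =====
-- Pre_ restricts to the function's stated natural domain (a digit string denoting a number below ten
-- thousand): on all-digit inputs whose stripped length is 5–8 A still returns a value, but only via
-- Python's negative tuple-index wraparound into the unit table, and on non-digit or ≥9-digit inputs
-- A raises (ValueError / IndexError).
def Pre_getUpperChineseNumUnderTenThousand (num : String) : Prop :=
  (num.toList.dropWhile (· == '0')).length ≤ 4 ∧
    ((num.toList.dropWhile (· == '0')).all (fun c => c.isDigit)) = true
instance (num : String) : Decidable (Pre_getUpperChineseNumUnderTenThousand num) := by
  unfold Pre_getUpperChineseNumUnderTenThousand; infer_instance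

def pvWitness_getUpperChineseNumUnderTenThousand : String := "1010"

def Spec_getUpperChineseNumUnderTenThousand (num : String) (out : String) : Prop := out = getUpperChineseNumUnderTenThousand_alt num
instance (num : String) (out : String) : Decidable (Spec_getUpperChineseNumUnderTenThousand num out) := by unfold Spec_getUpperChineseNumUnderTenThousand; infer_instance

-- ===== CLAIM (what is proved, stated in full; the proofs are below) =====
def Claim_equal_getUpperChineseNumUnderTenThousand : Prop := ∀ (num : String), Dom_getUpperChineseNumUnderTenThousand num → Pre_getUpperChineseNumUnderTenThousand num → Spec_getUpperChineseNumUnderTenThousand num (getUpperChineseNumUnderTenThousand num)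

-- ===== LEMMAS AND PROOFS =====

lemma pvne (c : Char) (h : c ≠ '0') : ¬((c.toNat : Int) - 48 = 0) := by
  intro hc
  apply h
  apply Char.ext
  unfold Char.toNat at hc
  exact UInt32.toNat_inj.mp (by simpa using (by omega : c.val.toNat = 48))

set_option maxHeartbeats 2000000 in
lemma pvMain_eq (t : List Char) (hlen : t.length ≤ 4) (hh : t.head? ≠ some '0') :
    pvMainA t = pvMainB t := by
  rcases t with _ | ⟨a, t⟩
  · rfl
  have ha : a ≠ '0' := by simpa using hh
  rcases t with _ | ⟨b, t⟩
  · simp [pvMainA, pvMainB, followNumHasNoZero, PySem.List.enumerate, List.range_succ,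
        ha, pvne a ha,
        pvUnderThousandNumType, pvChineseUnits]
  rcases t with _ | ⟨c, t⟩
  · rcases eq_or_ne b '0' with hb | hb
    · simp [pvMainA, pvMainB, followNumHasNoZero, PySem.List.enumerate, List.range_succ,
          ha, pvne a ha, hb,
          pvUnderThousandNumType, pvChineseUnits]
      try (split_ifs <;> simp_all)
    · simp [pvMainA, pvMainB, PySem.List.enumerate, List.range_succ,
          ha, pvne a ha, hb, pvne b hb,
          pvUnderThousandNumType, pvChineseUnits]
      try (split_ifs <;> simp_all)
  rcases t with _ | ⟨d, t⟩
  · rcases eq_or_ne b '0' with hb | hb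
    · rcases eq_or_ne c '0' with hc | hc
      · simp [pvMainA, pvMainB, followNumHasNoZero, PySem.List.enumerate, List.range_succ,
            ha, pvne a ha, hb, hc,
            pvUnderThousandNumType, pvChineseUnits]
      · simp [pvMainA, pvMainB, followNumHasNoZero, PySem.List.enumerate, List.range_succ,
            ha, pvne a ha, hb, hc, pvne c hc,
            pvUnderThousandNumType, pvChineseUnits]
    · rcases eq_or_ne c '0' with hc | hc
      · simp [pvMainA, pvMainB, followNumHasNoZero, PySem.List.enumerate, List.range_succ,
            ha, pvne a ha, hb, pvne b hb, hc,
            pvUnderThousandNumType, pvChineseUnits]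
        try (split_ifs <;> simp_all)
      · simp [pvMainA, pvMainB, PySem.List.enumerate, List.range_succ,
            ha, pvne a ha, hb, pvne b hb, hc, pvne c hc,
            pvUnderThousandNumType, pvChineseUnits]
        try (split_ifs <;> simp_all)
  rcases t with _ | ⟨e, t⟩
  · rcases eq_or_ne b '0' with hb | hb
    · rcases eq_or_ne c '0' with hc | hc
      · rcases eq_or_ne d '0' with hd | hd
        · simp [pvMainA, pvMainB, followNumHasNoZero, PySem.List.enumerate, List.range_succ,
              ha, pvne a ha, hb, hc, hd,
              pvUnderThousandNumType, pvChineseUnits]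
        · simp [pvMainA, pvMainB, followNumHasNoZero, PySem.List.enumerate, List.range_succ,
              ha, pvne a ha, hb, hc, hd, pvne d hd,
              pvUnderThousandNumType, pvChineseUnits]
      · rcases eq_or_ne d '0' with hd | hd
        · simp [pvMainA, pvMainB, followNumHasNoZero, PySem.List.enumerate, List.range_succ,
              ha, pvne a ha, hb, hc, pvne c hc, hd,
              pvUnderThousandNumType, pvChineseUnits]
          try (split_ifs <;> simp_all)
        · simp [pvMainA, pvMainB, followNumHasNoZero, PySem.List.enumerate, List.range_succ,
              ha, pvne a ha, hb, hc, pvne c hc, hd, pvne d hd,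
              pvUnderThousandNumType, pvChineseUnits]
          try (split_ifs <;> simp_all)
    · rcases eq_or_ne c '0' with hc | hc
      · rcases eq_or_ne d '0' with hd | hd
        · simp [pvMainA, pvMainB, followNumHasNoZero, PySem.List.enumerate, List.range_succ,
              ha, pvne a ha, hb, pvne b hb, hc, hd,
              pvUnderThousandNumType, pvChineseUnits]
        · simp [pvMainA, pvMainB, followNumHasNoZero, PySem.List.enumerate, List.range_succ,
              ha, pvne a ha, hb, pvne b hb, hc, hd, pvne d hd,
              pvUnderThousandNumType, pvChineseUnits]
      · rcases eq_or_ne d '0' with hd | hd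
        · simp [pvMainA, pvMainB, followNumHasNoZero, PySem.List.enumerate, List.range_succ,
              ha, pvne a ha, hb, pvne b hb, hc, pvne c hc, hd,
              pvUnderThousandNumType, pvChineseUnits]
          try (split_ifs <;> simp_all)
        · simp [pvMainA, pvMainB, PySem.List.enumerate, List.range_succ,
              ha, pvne a ha, hb, pvne b hb, hc, pvne c hc, hd, pvne d hd,
              pvUnderThousandNumType, pvChineseUnits]
          try (split_ifs <;> simp_all)
  · exact absurd hlen (by simp)

lemma pvDropWhile_head (l : List Char) : (l.dropWhile (· == '0')).head? ≠ some '0' := by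
  induction l with
  | nil => simp
  | cons a l ih =>
    by_cases h : a = '0'
    · simpa [h] using ih
    · simp [h]

-- ===== VERDICT (by name: the statement is the Claim_ definition above) =====
theorem getUpperChineseNumUnderTenThousand_spec : Claim_equal_getUpperChineseNumUnderTenThousand := by
  intro num _ hpre
  unfold Spec_getUpperChineseNumUnderTenThousand getUpperChineseNumUnderTenThousand getUpperChineseNumUnderTenThousand_alt
  exact pvMain_eq _ hpre.1 (pvDropWhile_head _)
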